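-- pv_equiv track=rewrite | github.com/MrBrantCode/unitest_baseline | mut_generate/mist_test_taco/taco_5683/solution.py | unique_substring_sum
-- ===== SOURCE A (Python) =====
-- def unique_substring_sum(s: str, k: int) -> int:
--     # Check if the string can be split into substrings of length k
--     if len(s) % k != 0:
--         return -1
--
--     # Set to store unique substrings
--     unique_substrings = set()
--
--     # Extract all substrings of length k
--     for i in range(0, len(s), k):
--         unique_substrings.add(s[i:i+k])
--
--     # Calculate the sum of unique substrings in decimal notation
--     total_sum = 0
--     for substring in unique_substrings:
--         total_sum += int(substring, 2)
--
--     return total_sum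
-- ===== SOURCE B (Python) =====
-- def unique_substring_sum(s: str, k: int) -> int:
--     # Same guard as A (len(s) % k raises ZeroDivisionError when k == 0, as in A)
--     if len(s) % k != 0:
--         return -1
--     # Sort the k-length chunks, then one pass skipping adjacent duplicates
--     chunks = sorted(s[i:i+k] for i in range(0, len(s), k))
--     total = 0
--     prev = None
--     for c in chunks:
--         if prev != c:
--             total += int(c, 2)
--             prev = c
--     return total
-- ===== Notes on version B (the rewrite author's own statement) =====
-- stated objective: alternative
-- what changed: Hash-set deduplication followed by a second summing loop is replaced by sorting the chunk list and summing in one pass that skips adjacent duplicates.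
import Mathlib
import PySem

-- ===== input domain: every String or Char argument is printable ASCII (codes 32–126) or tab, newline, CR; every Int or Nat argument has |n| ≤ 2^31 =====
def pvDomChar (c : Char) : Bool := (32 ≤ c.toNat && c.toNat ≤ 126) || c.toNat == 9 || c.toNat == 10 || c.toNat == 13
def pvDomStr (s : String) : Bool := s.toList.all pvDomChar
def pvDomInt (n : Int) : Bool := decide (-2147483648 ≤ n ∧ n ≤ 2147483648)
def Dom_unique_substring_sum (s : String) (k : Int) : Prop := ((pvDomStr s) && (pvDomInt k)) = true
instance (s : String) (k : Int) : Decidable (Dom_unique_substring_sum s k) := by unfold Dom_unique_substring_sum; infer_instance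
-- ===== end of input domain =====

-- B replaces A's hash-set deduplication + second summing loop by sorting the chunk
-- list and summing in one pass that skips adjacent duplicates (alternative decomposition).


-- ===== PORT A =====
def unique_substring_sum (s : String) (k : Int) : Int :=
  if PySem.Int.mod (PySem.Str.len s) k ≠ 0 then -1
  else
    -- set of unique substrings, built by adding each slice
    let uniq : PySem.Set String :=
      (PySem.List.pyRange 0 (PySem.Str.len s) k).foldl
        (fun acc i => PySem.Set.add acc (PySem.Str.slice s (some i) (some (i + k))))
        PySem.Set.empty
    -- int(substring, 2); Pre_ excludes the ValueError case, so the getD 0 never fires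
    uniq.foldl (fun total sub => total + (PySem.Int.ofStrBase? sub 2).getD 0) 0

-- ===== PORT B =====
-- one step of B's single pass: skip when equal to the previous chunk
def pvChunkStep (st : Int × Option String) (c : String) : Int × Option String :=
  if st.2 = some c then st
  else (st.1 + (PySem.Int.ofStrBase? c 2).getD 0, some c)

def unique_substring_sum_alt (s : String) (k : Int) : Int :=
  if PySem.Int.mod (PySem.Str.len s) k ≠ 0 then -1
  else
    let chunks := (PySem.List.pyRange 0 (PySem.Str.len s) k).map
      (fun i => PySem.Str.slice s (some i) (some (i + k)))
    ((PySem.List.sorted chunks (fun x => x) false).foldl pvChunkStep (0, none)).1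

-- ===== PRECONDITION & SPEC =====
-- Pre_ excludes exactly the inputs where Python A raises: k = 0 (ZeroDivisionError in
-- len(s) % k) and, when the string does split into k-chunks, a chunk that is not a
-- valid base-2 literal (ValueError in int(chunk, 2)).
def Pre_unique_substring_sum (s : String) (k : Int) : Prop :=
  k ≠ 0 ∧ (0 < k → PySem.Int.mod (PySem.Str.len s) k = 0 →
    ∀ i ∈ PySem.List.pyRange 0 (PySem.Str.len s) k,
      PySem.Int.ofStrBase? (PySem.Str.slice s (some i) (some (i + k))) 2 ≠ none)
instance (s : String) (k : Int) : Decidable (Pre_unique_substring_sum s k) := by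
  unfold Pre_unique_substring_sum; infer_instance

def pvWitness_unique_substring_sum : String × Int := ("0110", 2)

def Spec_unique_substring_sum (s : String) (k : Int) (out : Int) : Prop := out = unique_substring_sum_alt s k
instance (s : String) (k : Int) (out : Int) : Decidable (Spec_unique_substring_sum s k out) := by unfold Spec_unique_substring_sum; infer_instance

-- ===== CLAIM (what is proved, stated in full; the proofs are below) =====
def Claim_equal_unique_substring_sum : Prop := ∀ (s : String) (k : Int), Dom_unique_substring_sum s k → Pre_unique_substring_sum s k → Spec_unique_substring_sum s k (unique_substring_sum s k)

-- ===== LEMMAS AND PROOFS =====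
-- the decimal value of one chunk (as both ports compute it)
def pvVal (c : String) : Int := (PySem.Int.ofStrBase? c 2).getD 0

-- building a Python set by folding `add` appends exactly the new distinct elements
theorem pv_foldl_add_set (l : List String) : ∀ (s : List String),
    List.foldl PySem.Set.add s l = s ++ (PySem.List.dedup l).filter (fun y => !s.contains y) := by
  induction l with
  | nil => intro s; simp [PySem.List.dedup, PySem.Set.ofList]
  | cons x l ih =>
    intro s
    have hdl : PySem.List.dedup (x :: l)
        = x :: (PySem.List.dedup l).filter (fun y => !(([x] : List String).contains y)) := by
      show PySem.Set.ofList (x :: l) = _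
      unfold PySem.Set.ofList
      simp only [List.foldl_cons]
      have he : PySem.Set.add (PySem.Set.empty : PySem.Set String) x = [x] := by
        simp [PySem.Set.add, PySem.Set.empty]
      rw [he, ih [x]]
      simp
    simp only [List.foldl_cons]
    rw [ih (PySem.Set.add s x), hdl]
    by_cases hx : x ∈ s
    · have ha : PySem.Set.add s x = s := by
        simp [PySem.Set.add, hx]
      rw [ha]
      simp only [List.filter_cons]
      have hcx : (!s.contains x) = false := by simp [hx]
      rw [hcx]
      simp only [Bool.false_eq_true, reduceIte]
      rw [List.filter_filter]
      congr 1
      apply List.filter_congr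
      intro y _
      by_cases hy : y ∈ s
      · simp [hy]
      · have : y ≠ x := fun h => hy (h ▸ hx)
        simp [hy, this]
    · have ha : PySem.Set.add s x = s ++ [x] := by
        simp [PySem.Set.add, hx]
      rw [ha, List.append_assoc]
      congr 1
      simp only [List.filter_cons]
      have hcx : (!s.contains x) = true := by simp [hx]
      rw [hcx]
      simp only [List.singleton_append, if_pos]
      congr 1
      rw [List.filter_filter]
      apply List.filter_congr
      intro y _
      by_cases hyx : y = x
      · simp [hyx, hx]
      · by_cases hy : y ∈ s <;> simp [hy, hyx]

-- `dedup` on a cons keeps the head and removes it from the deduped tail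
theorem pv_dedup_cons (x : String) (l : List String) :
    PySem.List.dedup (x :: l) = x :: (PySem.List.dedup l).filter (fun y => !(y == x)) := by
  show PySem.Set.ofList (x :: l) = _
  unfold PySem.Set.ofList
  simp only [List.foldl_cons]
  have he : PySem.Set.add (PySem.Set.empty : PySem.Set String) x = [x] := by
    simp [PySem.Set.add, PySem.Set.empty]
  rw [he, pv_foldl_add_set l [x]]
  simp only [List.singleton_append, List.cons.injEq, true_and]
  apply List.filter_congr
  intro y _
  rcases eq_or_ne y x with h | h
  · subst h; simp
  · simp [h]

-- B's adjacent-skip pass over a sorted tail whose elements are all ≥ the previous chunk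
theorem pv_adj (l : List String) (hl : l.Pairwise (· ≤ ·)) : ∀ (t : Int) (p : String),
    (∀ x ∈ l, p ≤ x) →
    (l.foldl pvChunkStep (t, some p)).1
      = t + (((PySem.List.dedup l).filter (fun y => !(y == p))).map pvVal).sum := by
  induction l with
  | nil => intro t p _; simp [PySem.List.dedup, PySem.Set.ofList]
  | cons x l ih =>
    intro t p hp
    have hl' := (List.pairwise_cons.mp hl).2
    have hxl := (List.pairwise_cons.mp hl).1
    simp only [List.foldl_cons]
    by_cases hxp : x = p
    · subst hxp
      simp only [pvChunkStep, reduceIte]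
      rw [ih hl' t x (fun y hy => hxl y hy)]
      congr 2
      rw [pv_dedup_cons, List.filter_cons]
      simp only [beq_self_eq_true, Bool.not_true, Bool.false_eq_true, reduceIte]
      rw [List.filter_filter]
      congr 1
      apply List.filter_congr
      intro y _; simp
    · have hstep : pvChunkStep (t, some p) x = (t + pvVal x, some x) := by
        have hpx : ¬ ((t, some p).2 = some x) := by simp; exact fun h => hxp h.symm
        simp [pvChunkStep, pvVal, hpx]
      rw [hstep, ih hl' (t + pvVal x) x (fun y hy => hxl y hy)]
      rw [pv_dedup_cons, List.filter_cons]
      have : (!(x == p)) = true := by simp [hxp]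
      rw [this]
      simp only [reduceIte, List.map_cons, List.sum_cons]
      rw [List.filter_filter]
      have hfc : (PySem.List.dedup l).filter (fun y => !(y == p) && !(y == x))
          = (PySem.List.dedup l).filter (fun y => !(y == x)) := by
        apply List.filter_congr
        intro y hy
        by_cases hyx : y = x
        · simp [hyx]
        · have hyp : y ≠ p := by
            intro h; subst h
            have hyl : y ∈ l := (PySem.List.mem_dedup l y).mp hy
            exact hxp (le_antisymm (hxl y hyl) (hp x (List.mem_cons_self)))
          simp [hyx, hyp]
      rw [hfc]; ring

-- B's whole pass sums exactly the distinct elements of a sorted list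
theorem pv_fold_none (l : List String) (hl : l.Pairwise (· ≤ ·)) :
    (l.foldl pvChunkStep (0, none)).1 = ((PySem.List.dedup l).map pvVal).sum := by
  cases l with
  | nil => simp [PySem.List.dedup, PySem.Set.ofList]
  | cons x l =>
    have hl' := (List.pairwise_cons.mp hl).2
    have hxl := (List.pairwise_cons.mp hl).1
    simp only [List.foldl_cons]
    have hstep : pvChunkStep (0, none) x = (0 + pvVal x, some x) := by
      simp [pvChunkStep, pvVal]
    rw [hstep, pv_adj l hl' (0 + pvVal x) x (fun y hy => hxl y hy)]
    rw [pv_dedup_cons]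
    simp [pvVal]

-- the two ports agree on every input (no Pre_ needed for the equality itself)
theorem pv_main (s : String) (k : Int) :
    unique_substring_sum s k = unique_substring_sum_alt s k := by
  unfold unique_substring_sum unique_substring_sum_alt
  by_cases h : PySem.Int.mod (PySem.Str.len s) k ≠ 0
  · rw [if_pos h, if_pos h]
  · rw [if_neg h, if_neg h]
    set chunks := (PySem.List.pyRange 0 (PySem.Str.len s) k).map
      (fun i => PySem.Str.slice s (some i) (some (i + k))) with hchunks
    have hA : (PySem.List.pyRange 0 (PySem.Str.len s) k).foldl
        (fun acc i => PySem.Set.add acc (PySem.Str.slice s (some i) (some (i + k))))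
        PySem.Set.empty = PySem.List.dedup chunks := by
      rw [hchunks, ← List.foldl_map, pv_foldl_add_set]
      simp [PySem.Set.empty]
    rw [hA, PySem.List.foldl_add _ (fun sub => (PySem.Int.ofStrBase? sub 2).getD 0) 0]
    have hsorted := PySem.List.sorted_pairwise chunks (fun x => x)
    have hB := pv_fold_none (PySem.List.sorted chunks (fun x => x) false)
      (by simpa using hsorted)
    rw [hB]
    have hperm : (PySem.List.dedup (PySem.List.sorted chunks (fun x => x) false)).Perm
        (PySem.List.dedup chunks) := by
      rw [List.perm_ext_iff_of_nodup (PySem.List.nodup_dedup _) (PySem.List.nodup_dedup _)]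
      intro a
      simp [PySem.List.mem_sorted]
    have := (hperm.map pvVal).sum_eq
    simpa [pvVal, PySem.List.dedup] using this.symm

-- ===== VERDICT (by name: the statement is the Claim_ definition above) =====
theorem unique_substring_sum_spec : Claim_equal_unique_substring_sum := by
  intro s k _ _
  unfold Spec_unique_substring_sum
  exact pv_main s k
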